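-- pv_equiv track=rewrite | github.com/matiasportugau-ui/chatbot-2311 | scripts/discovery/create_production_baseline.py | _create_production_checklist
-- ===== SOURCE A (Python) =====
-- from typing import Dict, List, Any
--
-- def _create_production_checklist(production_gaps: Dict = None) -> List[Dict[str, Any]]:
--     """Create production readiness checklist"""
--     checklist = [
--         {
--             "category": "integrations",
--             "item": "WhatsApp Business API configured",
--             "status": "pending",
--             "priority": "P0"
--         },
--         {
--             "category": "integrations",
--             "item": "n8n workflows configured",
--             "status": "pending",
--             "priority": "P0"
--         },
--         {
--             "category": "integrations",
--             "item": "Qdrant vector database configured",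
--             "status": "pending",
--             "priority": "P1"
--         },
--         {
--             "category": "security",
--             "item": "Webhook signature validation implemented",
--             "status": "pending",
--             "priority": "P0"
--         },
--         {
--             "category": "security",
--             "item": "Secrets management configured",
--             "status": "pending",
--             "priority": "P0"
--         },
--         {
--             "category": "security",
--             "item": "Rate limiting implemented",
--             "status": "pending",
--             "priority": "P1"
--         },
--         {
--             "category": "infrastructure",
--             "item": "Docker configuration complete",
--             "status": "pending",
--             "priority": "P0"
--         },
--         {
--             "category": "infrastructure",
--             "item": "CI/CD pipeline configured",
--             "status": "pending",
--             "priority": "P1"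
--         },
--         {
--             "category": "monitoring",
--             "item": "Logging system configured",
--             "status": "pending",
--             "priority": "P1"
--         },
--         {
--             "category": "monitoring",
--             "item": "Metrics collection set up",
--             "status": "pending",
--             "priority": "P1"
--         },
--         {
--             "category": "quotation_engine",
--             "item": "Product catalog complete",
--             "status": "pending",
--             "priority": "P0"
--         },
--         {
--             "category": "quotation_engine",
--             "item": "Pricing zones configured",
--             "status": "pending",
--             "priority": "P0"
--         }
--     ]
--
--     # Update checklist based on gaps
--     if production_gaps:
--         gaps = production_gaps.get("prioritized_gaps", [])
--         for gap in gaps: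
--             category = gap.get("category", "")
--             component = gap.get("component", "")
--
--             # Find matching checklist item
--             for item in checklist:
--                 if item["category"] == category and component.lower() in item["item"].lower():
--                     item["status"] = "blocked"
--                     break
--
--     return checklist
-- ===== SOURCE B (Python) =====
-- from typing import Dict, List, Any
--
-- _BASE = [
--     ("integrations", "WhatsApp Business API configured", "P0"),
--     ("integrations", "n8n workflows configured", "P0"),
--     ("integrations", "Qdrant vector database configured", "P1"),
--     ("security", "Webhook signature validation implemented", "P0"),
--     ("security", "Secrets management configured", "P0"),
--     ("security", "Rate limiting implemented", "P1"),
--     ("infrastructure", "Docker configuration complete", "P0"),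
--     ("infrastructure", "CI/CD pipeline configured", "P1"),
--     ("monitoring", "Logging system configured", "P1"),
--     ("monitoring", "Metrics collection set up", "P1"),
--     ("quotation_engine", "Product catalog complete", "P0"),
--     ("quotation_engine", "Pricing zones configured", "P0"),
-- ]
--
--
-- def _create_production_checklist(production_gaps: Dict = None) -> List[Dict[str, Any]]:
--     """Create production readiness checklist (category-indexed rewrite)."""
--     by_cat = {}
--     for i, (cat, _item, _prio) in enumerate(_BASE):
--         by_cat.setdefault(cat, []).append(i)
--
--     statuses = ["pending"] * len(_BASE)
--     if production_gaps:
--         for gap in production_gaps.get("prioritized_gaps", []):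
--             comp = gap.get("component", "").lower()
--             for i in by_cat.get(gap.get("category", ""), []):
--                 if comp in _BASE[i][1].lower():
--                     statuses[i] = "blocked"
--                     break
--
--     return [
--         {"category": cat, "item": item, "status": st, "priority": prio}
--         for (cat, item, prio), st in zip(_BASE, statuses)
--     ]
-- ===== Notes on version B (the rewrite author's own statement) =====
-- stated objective: idiomatic
-- what changed: B replaces A's mutated list of dicts and full-checklist inner scan with a constant tuple table, a category-to-indices dict built once so each gap scans only its own category's items, a separate statuses array, and a single comprehension that renders the checklist at the end.
import Mathlib
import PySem

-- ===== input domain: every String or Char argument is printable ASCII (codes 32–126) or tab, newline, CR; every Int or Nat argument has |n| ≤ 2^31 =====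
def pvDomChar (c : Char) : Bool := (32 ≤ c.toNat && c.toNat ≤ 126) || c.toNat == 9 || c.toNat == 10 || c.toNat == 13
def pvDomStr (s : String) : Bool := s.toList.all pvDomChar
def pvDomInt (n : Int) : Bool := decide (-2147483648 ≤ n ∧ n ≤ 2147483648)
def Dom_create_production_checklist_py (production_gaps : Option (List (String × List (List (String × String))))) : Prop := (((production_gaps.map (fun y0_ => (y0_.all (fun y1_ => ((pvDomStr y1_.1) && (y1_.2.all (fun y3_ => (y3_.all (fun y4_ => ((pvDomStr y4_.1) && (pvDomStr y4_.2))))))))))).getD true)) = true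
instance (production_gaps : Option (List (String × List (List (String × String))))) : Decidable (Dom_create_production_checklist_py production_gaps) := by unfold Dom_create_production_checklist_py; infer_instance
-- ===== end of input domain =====

-- B replaces A's in-place mutation of a list of dicts (full inner scan per gap) by a constant
-- base table, a category→indices dict built once, a separate statuses array and one final render
-- pass; same return value, Python A mutates only its own fresh list (no observable side effects).

-- ===== PORT A =====
-- item dict literal {"category": c, "item": it, "status": st, "priority": p}
def pvMkItem (c it st p : String) : PySem.Dict String String :=
  PySem.Dict.mk [("category", c), ("item", it), ("status", st), ("priority", p)]

def pvChecklistA : List (PySem.Dict String String) :=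
  [ pvMkItem "integrations" "WhatsApp Business API configured" "pending" "P0",
    pvMkItem "integrations" "n8n workflows configured" "pending" "P0",
    pvMkItem "integrations" "Qdrant vector database configured" "pending" "P1",
    pvMkItem "security" "Webhook signature validation implemented" "pending" "P0",
    pvMkItem "security" "Secrets management configured" "pending" "P0",
    pvMkItem "security" "Rate limiting implemented" "pending" "P1",
    pvMkItem "infrastructure" "Docker configuration complete" "pending" "P0",
    pvMkItem "infrastructure" "CI/CD pipeline configured" "pending" "P1",
    pvMkItem "monitoring" "Logging system configured" "pending" "P1",
    pvMkItem "monitoring" "Metrics collection set up" "pending" "P1",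
    pvMkItem "quotation_engine" "Product catalog complete" "pending" "P0",
    pvMkItem "quotation_engine" "Pricing zones configured" "pending" "P0" ]

-- the inner 'for item in checklist: … break' loop (item["…"] keys are always present,
-- so d[k] is ported as getD with default "")
def pvMarkFirstA (category component : String) :
    List (PySem.Dict String String) → List (PySem.Dict String String)
  | [] => []
  | item :: rest =>
      if (item.getD "category" "" == category)
          && PySem.Str.isIn (PySem.Str.lower component) (PySem.Str.lower (item.getD "item" "")) then
        item.insert "status" "blocked" :: rest
      else
        item :: pvMarkFirstA category component rest

def create_production_checklist_py (production_gaps : Option (List (String × List (List (String × String))))) : List (List (String × String)) :=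
  let checklist := pvChecklistA
  let checklist :=
    match production_gaps with
    | none => checklist                    -- 'if production_gaps:' false for None
    | some d =>
      match d with
      | [] => checklist                    -- 'if production_gaps:' false for {}
      | _ =>
        let gaps := (PySem.Dict.mk d).getD "prioritized_gaps" []
        gaps.foldl (fun cl gap =>
          pvMarkFirstA ((PySem.Dict.mk gap).getD "category" "")
                       ((PySem.Dict.mk gap).getD "component" "") cl) checklist
  checklist.map PySem.Dict.items

-- ===== PORT B =====
def pvBaseB : List (String × String × String) :=
  [ ("integrations", "WhatsApp Business API configured", "P0"),
    ("integrations", "n8n workflows configured", "P0"),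
    ("integrations", "Qdrant vector database configured", "P1"),
    ("security", "Webhook signature validation implemented", "P0"),
    ("security", "Secrets management configured", "P0"),
    ("security", "Rate limiting implemented", "P1"),
    ("infrastructure", "Docker configuration complete", "P0"),
    ("infrastructure", "CI/CD pipeline configured", "P1"),
    ("monitoring", "Logging system configured", "P1"),
    ("monitoring", "Metrics collection set up", "P1"),
    ("quotation_engine", "Product catalog complete", "P0"),
    ("quotation_engine", "Pricing zones configured", "P0") ]

-- by_cat.setdefault(cat, []).append(i) over enumerate(_BASE)
def pvByCat : PySem.Dict String (List Int) :=
  (PySem.List.enumerate pvBaseB).foldl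
    (fun d p => d.modify p.2.1 [] (· ++ [p.1])) PySem.Dict.empty

-- 'for i in by_cat.get(…, []): if comp in _BASE[i][1].lower(): statuses[i] = "blocked"; break'
def pvSetFirstB (comp : String) : List Int → List String → List String
  | [], statuses => statuses
  | i :: rest, statuses =>
      if PySem.Str.isIn comp (PySem.Str.lower (PySem.List.pyGetD pvBaseB i ("", "", "")).2.1) then
        PySem.List.pySetD statuses i "blocked"
      else pvSetFirstB comp rest statuses

def pvStepB (gap : List (String × String)) (statuses : List String) : List String :=
  pvSetFirstB (PySem.Str.lower ((PySem.Dict.mk gap).getD "component" ""))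
    (pvByCat.getD ((PySem.Dict.mk gap).getD "category" "") []) statuses

def create_production_checklist_py_alt (production_gaps : Option (List (String × List (List (String × String))))) : List (List (String × String)) :=
  let statuses := List.replicate pvBaseB.length "pending"
  let statuses :=
    match production_gaps with
    | some (g0 :: rest) =>              -- 'if production_gaps:' true exactly for a non-empty dict
        ((PySem.Dict.mk (g0 :: rest)).getD "prioritized_gaps" []).foldl
          (fun sts gap => pvStepB gap sts) statuses
    | _ => statuses
  (pvBaseB.zip statuses).map (fun q =>
    [("category", q.1.1), ("item", q.1.2.1), ("status", q.2), ("priority", q.1.2.2)])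

-- ===== PRECONDITION & SPEC =====
def Spec_create_production_checklist_py (production_gaps : Option (List (String × List (List (String × String))))) (out : List (List (String × String))) : Prop := out = create_production_checklist_py_alt production_gaps
instance (production_gaps : Option (List (String × List (List (String × String))))) (out : List (List (String × String))) : Decidable (Spec_create_production_checklist_py production_gaps out) := by unfold Spec_create_production_checklist_py; infer_instance

-- ===== CLAIM (what is proved, stated in full; the proofs are below) =====
def Claim_equal_create_production_checklist_py : Prop := ∀ (production_gaps : Option (List (String × List (List (String × String))))), Dom_create_production_checklist_py production_gaps → Spec_create_production_checklist_py production_gaps (create_production_checklist_py production_gaps)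

-- ===== LEMMAS AND PROOFS =====

-- A's checklist with the statuses held abstractly: pvChecklistA = pvWrap (replicate 12 "pending")
def pvWrap (statuses : List String) : List (PySem.Dict String String) :=
  (pvBaseB.zip statuses).map (fun q => pvMkItem q.1.1 q.1.2.1 q.2 q.1.2.2)

theorem pvByCat_eval : pvByCat = PySem.Dict.mk
    [("integrations", [0, 1, 2]), ("security", [3, 4, 5]), ("infrastructure", [6, 7]),
     ("monitoring", [8, 9]), ("quotation_engine", [10, 11])] := by
  decide

@[simp] theorem pvGetD_cat (c it st p : String) : (pvMkItem c it st p).getD "category" "" = c := rfl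
@[simp] theorem pvGetD_item (c it st p : String) : (pvMkItem c it st p).getD "item" "" = it := rfl
@[simp] theorem pvInsert_status (c it st p : String) :
    (pvMkItem c it st p).insert "status" "blocked" = pvMkItem c it "blocked" p := rfl

theorem pvB0 : (PySem.List.pyGetD pvBaseB 0 ("", "", "")).2.1 = "WhatsApp Business API configured" := by decide
theorem pvB1 : (PySem.List.pyGetD pvBaseB 1 ("", "", "")).2.1 = "n8n workflows configured" := by decide
theorem pvB2 : (PySem.List.pyGetD pvBaseB 2 ("", "", "")).2.1 = "Qdrant vector database configured" := by decide
theorem pvB3 : (PySem.List.pyGetD pvBaseB 3 ("", "", "")).2.1 = "Webhook signature validation implemented" := by decide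
theorem pvB4 : (PySem.List.pyGetD pvBaseB 4 ("", "", "")).2.1 = "Secrets management configured" := by decide
theorem pvB5 : (PySem.List.pyGetD pvBaseB 5 ("", "", "")).2.1 = "Rate limiting implemented" := by decide
theorem pvB6 : (PySem.List.pyGetD pvBaseB 6 ("", "", "")).2.1 = "Docker configuration complete" := by decide
theorem pvB7 : (PySem.List.pyGetD pvBaseB 7 ("", "", "")).2.1 = "CI/CD pipeline configured" := by decide
theorem pvB8 : (PySem.List.pyGetD pvBaseB 8 ("", "", "")).2.1 = "Logging system configured" := by decide
theorem pvB9 : (PySem.List.pyGetD pvBaseB 9 ("", "", "")).2.1 = "Metrics collection set up" := by decide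
theorem pvB10 : (PySem.List.pyGetD pvBaseB 10 ("", "", "")).2.1 = "Product catalog complete" := by decide
theorem pvB11 : (PySem.List.pyGetD pvBaseB 11 ("", "", "")).2.1 = "Pricing zones configured" := by decide

theorem pvStep_eq (c m : String) (s : List String) (hs : s.length = 12) :
    pvMarkFirstA c m (pvWrap s) =
      pvWrap (pvSetFirstB (PySem.Str.lower m) (pvByCat.getD c []) s) := by
  rcases s with _ | ⟨s1, s⟩; · simp at hs
  rcases s with _ | ⟨s2, s⟩; · simp at hs
  rcases s with _ | ⟨s3, s⟩; · simp at hs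
  rcases s with _ | ⟨s4, s⟩; · simp at hs
  rcases s with _ | ⟨s5, s⟩; · simp at hs
  rcases s with _ | ⟨s6, s⟩; · simp at hs
  rcases s with _ | ⟨s7, s⟩; · simp at hs
  rcases s with _ | ⟨s8, s⟩; · simp at hs
  rcases s with _ | ⟨s9, s⟩; · simp at hs
  rcases s with _ | ⟨s10, s⟩; · simp at hs
  rcases s with _ | ⟨s11, s⟩; · simp at hs
  rcases s with _ | ⟨s12, s⟩; · simp at hs
  obtain rfl : s = [] := by
    have h0 : s.length = 0 := by simp only [List.length_cons] at hs; omega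
    exact List.length_eq_zero_iff.mp h0
  by_cases h1 : c = "integrations"
  · subst h1
    rw [show pvByCat.getD "integrations" [] = [0, 1, 2] by decide]
    simp only [pvWrap, pvBaseB, List.zip_cons_cons, List.zip_nil_right, List.map_cons, List.map_nil]
    simp only [pvSetFirstB, pvB0, pvB1, pvB2]
    simp only [pvMarkFirstA, pvGetD_cat, pvGetD_item, pvInsert_status]
    simp
    try (split_ifs <;> rfl)
  by_cases h2 : c = "security"
  · subst h2
    rw [show pvByCat.getD "security" [] = [3, 4, 5] by decide]
    simp only [pvWrap, pvBaseB, List.zip_cons_cons, List.zip_nil_right, List.map_cons, List.map_nil]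
    simp only [pvSetFirstB, pvB3, pvB4, pvB5]
    simp only [pvMarkFirstA, pvGetD_cat, pvGetD_item, pvInsert_status]
    simp
    try (split_ifs <;> rfl)
  by_cases h3 : c = "infrastructure"
  · subst h3
    rw [show pvByCat.getD "infrastructure" [] = [6, 7] by decide]
    simp only [pvWrap, pvBaseB, List.zip_cons_cons, List.zip_nil_right, List.map_cons, List.map_nil]
    simp only [pvSetFirstB, pvB6, pvB7]
    simp only [pvMarkFirstA, pvGetD_cat, pvGetD_item, pvInsert_status]
    simp
    try (split_ifs <;> rfl)
  by_cases h4 : c = "monitoring"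
  · subst h4
    rw [show pvByCat.getD "monitoring" [] = [8, 9] by decide]
    simp only [pvWrap, pvBaseB, List.zip_cons_cons, List.zip_nil_right, List.map_cons, List.map_nil]
    simp only [pvSetFirstB, pvB8, pvB9]
    simp only [pvMarkFirstA, pvGetD_cat, pvGetD_item, pvInsert_status]
    simp
    try (split_ifs <;> rfl)
  by_cases h5 : c = "quotation_engine"
  · subst h5
    rw [show pvByCat.getD "quotation_engine" [] = [10, 11] by decide]
    simp only [pvWrap, pvBaseB, List.zip_cons_cons, List.zip_nil_right, List.map_cons, List.map_nil]
    simp only [pvSetFirstB, pvB10, pvB11]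
    simp only [pvMarkFirstA, pvGetD_cat, pvGetD_item, pvInsert_status]
    simp
    try (split_ifs <;> rfl)
  have g1 : ("integrations" == c) = false := beq_eq_false_iff_ne.mpr (fun h => h1 h.symm)
  have g2 : ("security" == c) = false := beq_eq_false_iff_ne.mpr (fun h => h2 h.symm)
  have g3 : ("infrastructure" == c) = false := beq_eq_false_iff_ne.mpr (fun h => h3 h.symm)
  have g4 : ("monitoring" == c) = false := beq_eq_false_iff_ne.mpr (fun h => h4 h.symm)
  have g5 : ("quotation_engine" == c) = false := beq_eq_false_iff_ne.mpr (fun h => h5 h.symm)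
  have e : pvByCat.getD c [] = [] := by
    rw [pvByCat_eval]
    simp [PySem.Dict.getD_eq_get?_getD, g1, g2, g3, g4, g5,
      PySem.Dict.get?]
  rw [e]
  simp only [pvSetFirstB]
  simp only [pvWrap, pvBaseB, List.zip_cons_cons, List.zip_nil_right, List.map_cons, List.map_nil]
  simp only [pvMarkFirstA, pvGetD_cat, pvGetD_item, g1, g2, g3, g4, g5, Bool.false_and,
    Bool.false_eq_true, if_false]

theorem pvSetFirstB_length (comp : String) (idxs : List Int) (s : List String) :
    (pvSetFirstB comp idxs s).length = s.length := by
  induction idxs generalizing s with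
  | nil => rfl
  | cons i rest ih =>
    simp only [pvSetFirstB]
    split
    · exact PySem.List.length_pySetD ..
    · exact ih s

theorem pvFold_eq (gaps : List (List (String × String))) :
    ∀ (s : List String), s.length = 12 →
      gaps.foldl (fun cl gap =>
          pvMarkFirstA ((PySem.Dict.mk gap).getD "category" "")
                       ((PySem.Dict.mk gap).getD "component" "") cl) (pvWrap s) =
      pvWrap (gaps.foldl (fun sts gap => pvStepB gap sts) s) := by
  induction gaps with
  | nil => intro s _; rfl
  | cons g gs ih =>
    intro s hs
    simp only [List.foldl_cons]
    rw [pvStep_eq _ _ _ hs]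
    exact ih _ (by rw [pvSetFirstB_length]; exact hs)

-- ===== VERDICT (by name: the statement is the Claim_ definition above) =====
theorem create_production_checklist_py_spec : Claim_equal_create_production_checklist_py := by
  intro pg _
  unfold Spec_create_production_checklist_py create_production_checklist_py create_production_checklist_py_alt
  match pg with
  | none => rfl
  | some [] => rfl
  | some (x :: d) =>
    show (((PySem.Dict.mk (x :: d)).getD "prioritized_gaps" []).foldl _ pvChecklistA).map PySem.Dict.items = _
    rw [show pvChecklistA = pvWrap (List.replicate pvBaseB.length "pending") from rfl]
    rw [pvFold_eq _ _ (by rfl)]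
    simp only [pvWrap, List.map_map]
    rfl
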